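-- pv_equiv track=rewrite | github.com/ibloise/FIS_opentrons_protocols | PBS_dispensing.py | distribute_vol_and_offsets
-- ===== SOURCE A (Python) =====
-- def distribute_vol_and_offsets(number_of_tubes, tubes_slot_list, source_slot_list, offset_iterates,
-- max_tube_by_rack, max_source_tube_by_rack, max_tubes_fill_by_iter, tube_key_preffix = 'tube_',
-- tube_rack_slot_key = 'rack_tube_slot', tube_well_key = 'tube_well', falcon_tube_rack_slot_key = 'falcon_rack_slot',
-- falcon_well_key = 'falcon_well', offset_key = 'offset'):
--     #Set variables
--     dist_dict={}
--     epp_rack_idx = 0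
--     tube_well_idx = 0
--     falcon_rack_idx = 0
--     falcon_well_idx = 0
--     offset_idx = 0
--     tubes_fill_in_iter = 0
--     #iter by tubes
--     for tube in range(number_of_tubes):
--         tube_key = tube_key_preffix + str(tube)
--         dist_dict[tube_key] = {}
--         #set tubes rack and well
--         dist_dict[tube_key][tube_rack_slot_key] = tubes_slot_list[epp_rack_idx]
--         dist_dict[tube_key][tube_well_key] = tube_well_idx
--         tube_well_idx +=1
--         # control dest parameters
--         if tube_well_idx >= max_tube_by_rack:
--             epp_rack_idx +=1
--             tube_well_idx = 0
--         # set source well, rack and offset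
--         dist_dict[tube_key][falcon_tube_rack_slot_key] = source_slot_list[falcon_rack_idx]
--         dist_dict[tube_key][falcon_well_key] = falcon_well_idx
--         dist_dict[tube_key][offset_key] = offset_iterates[offset_idx]
--         tubes_fill_in_iter +=1
--         #control source parameters
--         if tubes_fill_in_iter >= max_tubes_fill_by_iter:
--             offset_idx +=1
--             tubes_fill_in_iter = 0
--             if offset_idx >=len(offset_iterates):
--                 falcon_well_idx +=1
--                 offset_idx = 0
--                 if falcon_well_idx >= max_source_tube_by_rack:
--                     falcon_rack_idx +=1
--                     falcon_well_idx = 0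
--     return(dist_dict)
-- ===== SOURCE B (Python) =====
-- def distribute_vol_and_offsets(number_of_tubes, tubes_slot_list, source_slot_list, offset_iterates,
-- max_tube_by_rack, max_source_tube_by_rack, max_tubes_fill_by_iter, tube_key_preffix = 'tube_',
-- tube_rack_slot_key = 'rack_tube_slot', tube_well_key = 'tube_well', falcon_tube_rack_slot_key = 'falcon_rack_slot',
-- falcon_well_key = 'falcon_well', offset_key = 'offset'):
--     # Closed-form positions: no running counters, every index is a divmod of the tube number.
--     # A capacity below 1 can hold at most one tube per slot, i.e. acts as 1.
--     m_tube = max(max_tube_by_rack, 1)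
--     m_fill = max(max_tubes_fill_by_iter, 1)
--     m_src = max(max_source_tube_by_rack, 1)
--     n_offsets = len(offset_iterates)
--     dist = {}
--     for tube in range(number_of_tubes):
--         epp_rack, tube_well = divmod(tube, m_tube)
--         iter_idx = tube // m_fill
--         well_idx, offset_idx = divmod(iter_idx, n_offsets)
--         falcon_rack, falcon_well = divmod(well_idx, m_src)
--         dist[tube_key_preffix + str(tube)] = {
--             tube_rack_slot_key: tubes_slot_list[epp_rack],
--             tube_well_key: tube_well,
--             falcon_tube_rack_slot_key: source_slot_list[falcon_rack],
--             falcon_well_key: falcon_well,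
--             offset_key: offset_iterates[offset_idx],
--         }
--     return dist
-- ===== Notes on version B (the rewrite author's own statement) =====
-- stated objective: alternative
-- what changed: A threads seven running counters with cascading carry/reset logic across loop iterations; B keeps the loop but computes every rack/well/offset index as a closed-form divmod of the tube number, maintaining no state between iterations.
import Mathlib
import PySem

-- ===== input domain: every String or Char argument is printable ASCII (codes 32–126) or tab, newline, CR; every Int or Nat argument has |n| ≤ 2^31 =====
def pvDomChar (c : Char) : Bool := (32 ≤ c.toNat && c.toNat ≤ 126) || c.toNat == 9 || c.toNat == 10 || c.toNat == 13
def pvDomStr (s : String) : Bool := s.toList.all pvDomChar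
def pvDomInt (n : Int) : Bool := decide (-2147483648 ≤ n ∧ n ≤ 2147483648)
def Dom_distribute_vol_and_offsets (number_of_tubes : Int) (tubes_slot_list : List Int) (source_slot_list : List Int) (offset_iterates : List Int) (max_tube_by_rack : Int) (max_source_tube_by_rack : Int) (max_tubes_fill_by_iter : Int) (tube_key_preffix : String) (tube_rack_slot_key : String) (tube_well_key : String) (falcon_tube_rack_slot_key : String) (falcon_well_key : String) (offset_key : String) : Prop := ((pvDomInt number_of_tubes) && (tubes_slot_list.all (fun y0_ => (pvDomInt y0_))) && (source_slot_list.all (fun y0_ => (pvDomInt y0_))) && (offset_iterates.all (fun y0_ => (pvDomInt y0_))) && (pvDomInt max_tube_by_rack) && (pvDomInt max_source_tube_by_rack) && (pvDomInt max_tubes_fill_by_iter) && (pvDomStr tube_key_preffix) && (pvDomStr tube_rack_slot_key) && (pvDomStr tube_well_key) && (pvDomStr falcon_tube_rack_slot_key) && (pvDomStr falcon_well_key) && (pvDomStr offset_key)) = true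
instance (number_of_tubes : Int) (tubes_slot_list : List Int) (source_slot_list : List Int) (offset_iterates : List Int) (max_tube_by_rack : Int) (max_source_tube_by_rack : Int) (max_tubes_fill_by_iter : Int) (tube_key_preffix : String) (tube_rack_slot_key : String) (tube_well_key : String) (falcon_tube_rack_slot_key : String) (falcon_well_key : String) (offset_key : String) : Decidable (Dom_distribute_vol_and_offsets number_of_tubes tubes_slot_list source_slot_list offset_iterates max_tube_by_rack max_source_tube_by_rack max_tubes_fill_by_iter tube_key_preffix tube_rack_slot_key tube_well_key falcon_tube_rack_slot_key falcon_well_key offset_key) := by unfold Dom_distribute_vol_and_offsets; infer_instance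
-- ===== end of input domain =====

-- B replaces A's seven running counters by closed-form divmod positions per tube (alternative decomposition, same cost).
-- Both ports model Python dicts with PySem.Dict (insertion order, overwrite in place); the result is the dict's item list.

-- ===== PORT A =====
-- Loop body of A. The Python state is (dist_dict, epp_rack_idx, tube_well_idx, falcon_rack_idx,
-- falcon_well_idx, offset_idx, tubes_fill_in_iter). dist_dict[tube_key] = {} creates an inner dict that the
-- following item assignments mutate through the alias dist_dict[tube_key]; it is threaded here as `inner`
-- (successive inserts in A's statement order) and stored under tube_key, exactly the final Python dict.
-- The multi-assignment `if` blocks are ported variable-wise (same conditions, same order).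
-- List indexing is PySem.List.pyGet? (none = IndexError, excluded by Pre_); `.getD 0` only totalises the port.
def pvStepA (tubes_slot_list source_slot_list offset_iterates : List Int)
    (max_tube_by_rack max_source_tube_by_rack max_tubes_fill_by_iter : Int)
    (tube_key_preffix tube_rack_slot_key tube_well_key falcon_tube_rack_slot_key falcon_well_key offset_key : String)
    (st : PySem.Dict String (List (String × Int)) × Int × Int × Int × Int × Int × Int) (tube : Int) :
    PySem.Dict String (List (String × Int)) × Int × Int × Int × Int × Int × Int :=
  let d := st.1
  let epp_rack_idx := st.2.1
  let tube_well_idx := st.2.2.1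
  let falcon_rack_idx := st.2.2.2.1
  let falcon_well_idx := st.2.2.2.2.1
  let offset_idx := st.2.2.2.2.2.1
  let tubes_fill_in_iter := st.2.2.2.2.2.2
  let tube_key := tube_key_preffix ++ PySem.Int.toStr tube
  let inner : PySem.Dict String Int := PySem.Dict.empty
  let inner := inner.insert tube_rack_slot_key ((PySem.List.pyGet? tubes_slot_list epp_rack_idx).getD 0)
  let inner := inner.insert tube_well_key tube_well_idx
  let tube_well_idx := tube_well_idx + 1
  let epp_rack_idx' := if tube_well_idx ≥ max_tube_by_rack then epp_rack_idx + 1 else epp_rack_idx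
  let tube_well_idx' := if tube_well_idx ≥ max_tube_by_rack then 0 else tube_well_idx
  let inner := inner.insert falcon_tube_rack_slot_key ((PySem.List.pyGet? source_slot_list falcon_rack_idx).getD 0)
  let inner := inner.insert falcon_well_key falcon_well_idx
  let inner := inner.insert offset_key ((PySem.List.pyGet? offset_iterates offset_idx).getD 0)
  let tubes_fill_in_iter := tubes_fill_in_iter + 1
  let falcon_rack_idx' :=
    if tubes_fill_in_iter ≥ max_tubes_fill_by_iter then
      if offset_idx + 1 ≥ PySem.List.len offset_iterates then
        if falcon_well_idx + 1 ≥ max_source_tube_by_rack then falcon_rack_idx + 1 else falcon_rack_idx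
      else falcon_rack_idx
    else falcon_rack_idx
  let falcon_well_idx' :=
    if tubes_fill_in_iter ≥ max_tubes_fill_by_iter then
      if offset_idx + 1 ≥ PySem.List.len offset_iterates then
        if falcon_well_idx + 1 ≥ max_source_tube_by_rack then 0 else falcon_well_idx + 1
      else falcon_well_idx
    else falcon_well_idx
  let offset_idx' :=
    if tubes_fill_in_iter ≥ max_tubes_fill_by_iter then
      if offset_idx + 1 ≥ PySem.List.len offset_iterates then 0 else offset_idx + 1
    else offset_idx
  let tubes_fill_in_iter' := if tubes_fill_in_iter ≥ max_tubes_fill_by_iter then 0 else tubes_fill_in_iter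
  (d.insert tube_key inner.items, epp_rack_idx', tube_well_idx', falcon_rack_idx', falcon_well_idx', offset_idx', tubes_fill_in_iter')

def distribute_vol_and_offsets (number_of_tubes : Int) (tubes_slot_list : List Int) (source_slot_list : List Int) (offset_iterates : List Int) (max_tube_by_rack : Int) (max_source_tube_by_rack : Int) (max_tubes_fill_by_iter : Int) (tube_key_preffix : String) (tube_rack_slot_key : String) (tube_well_key : String) (falcon_tube_rack_slot_key : String) (falcon_well_key : String) (offset_key : String) : List (String × List (String × Int)) :=
  ((PySem.List.pyRange 0 number_of_tubes 1).foldl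
      (pvStepA tubes_slot_list source_slot_list offset_iterates max_tube_by_rack max_source_tube_by_rack
        max_tubes_fill_by_iter tube_key_preffix tube_rack_slot_key tube_well_key falcon_tube_rack_slot_key
        falcon_well_key offset_key)
      (PySem.Dict.empty, 0, 0, 0, 0, 0, 0)).1.items

-- ===== PORT B =====
-- One row of B: every position is a closed-form divmod of the tube number (Source B's loop body).
def pvRowB (tubes_slot_list source_slot_list offset_iterates : List Int)
    (m_tube m_src m_fill n_offsets : Int)
    (tube_rack_slot_key tube_well_key falcon_tube_rack_slot_key falcon_well_key offset_key : String)
    (tube : Int) : List (String × Int) :=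
  let epp_rack := PySem.Int.floordiv tube m_tube
  let tube_well := PySem.Int.mod tube m_tube
  let iter_idx := PySem.Int.floordiv tube m_fill
  let well_idx := PySem.Int.floordiv iter_idx n_offsets
  let offset_idx := PySem.Int.mod iter_idx n_offsets
  let falcon_rack := PySem.Int.floordiv well_idx m_src
  let falcon_well := PySem.Int.mod well_idx m_src
  (((((PySem.Dict.empty.insert tube_rack_slot_key ((PySem.List.pyGet? tubes_slot_list epp_rack).getD 0)).insert
        tube_well_key tube_well).insert
        falcon_tube_rack_slot_key ((PySem.List.pyGet? source_slot_list falcon_rack).getD 0)).insert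
        falcon_well_key falcon_well).insert
        offset_key ((PySem.List.pyGet? offset_iterates offset_idx).getD 0)).items

def distribute_vol_and_offsets_alt (number_of_tubes : Int) (tubes_slot_list : List Int) (source_slot_list : List Int) (offset_iterates : List Int) (max_tube_by_rack : Int) (max_source_tube_by_rack : Int) (max_tubes_fill_by_iter : Int) (tube_key_preffix : String) (tube_rack_slot_key : String) (tube_well_key : String) (falcon_tube_rack_slot_key : String) (falcon_well_key : String) (offset_key : String) : List (String × List (String × Int)) :=
  ((PySem.List.pyRange 0 number_of_tubes 1).foldl
      (fun d tube => d.insert (tube_key_preffix ++ PySem.Int.toStr tube)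
        (pvRowB tubes_slot_list source_slot_list offset_iterates (max max_tube_by_rack 1)
          (max max_source_tube_by_rack 1) (max max_tubes_fill_by_iter 1) (PySem.List.len offset_iterates)
          tube_rack_slot_key tube_well_key falcon_tube_rack_slot_key falcon_well_key offset_key tube))
      PySem.Dict.empty).items

-- ===== PRECONDITION & SPEC =====
-- Pre_ admits exactly the inputs on which the Python A returns normally: either no tubes, or
-- offset_iterates is nonempty and the largest destination-rack and source-rack indices the loop ever
-- uses (closed forms at the last tube, with capacities below 1 acting as 1) are in range; outside,
-- A raises IndexError on a list access.
def Pre_distribute_vol_and_offsets (number_of_tubes : Int) (tubes_slot_list : List Int) (source_slot_list : List Int) (offset_iterates : List Int) (max_tube_by_rack : Int) (max_source_tube_by_rack : Int) (max_tubes_fill_by_iter : Int) (tube_key_preffix : String) (tube_rack_slot_key : String) (tube_well_key : String) (falcon_tube_rack_slot_key : String) (falcon_well_key : String) (offset_key : String) : Prop :=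
  number_of_tubes ≤ 0 ∨
    (offset_iterates ≠ [] ∧
      (number_of_tubes - 1) / (max max_tube_by_rack 1) < (tubes_slot_list.length : Int) ∧
      (number_of_tubes - 1) / (max max_tubes_fill_by_iter 1) / (offset_iterates.length : Int) /
          (max max_source_tube_by_rack 1) < (source_slot_list.length : Int))
instance (number_of_tubes : Int) (tubes_slot_list : List Int) (source_slot_list : List Int) (offset_iterates : List Int) (max_tube_by_rack : Int) (max_source_tube_by_rack : Int) (max_tubes_fill_by_iter : Int) (tube_key_preffix : String) (tube_rack_slot_key : String) (tube_well_key : String) (falcon_tube_rack_slot_key : String) (falcon_well_key : String) (offset_key : String) : Decidable (Pre_distribute_vol_and_offsets number_of_tubes tubes_slot_list source_slot_list offset_iterates max_tube_by_rack max_source_tube_by_rack max_tubes_fill_by_iter tube_key_preffix tube_rack_slot_key tube_well_key falcon_tube_rack_slot_key falcon_well_key offset_key) := by unfold Pre_distribute_vol_and_offsets; infer_instance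

def pvWitness_distribute_vol_and_offsets : Int × List Int × List Int × List Int × Int × Int × Int × String × String × String × String × String × String :=
  (4, [1, 2], [3], [5, 6], 2, 1, 2, "tube_", "r", "w", "fr", "fw", "o")

def Spec_distribute_vol_and_offsets (number_of_tubes : Int) (tubes_slot_list : List Int) (source_slot_list : List Int) (offset_iterates : List Int) (max_tube_by_rack : Int) (max_source_tube_by_rack : Int) (max_tubes_fill_by_iter : Int) (tube_key_preffix : String) (tube_rack_slot_key : String) (tube_well_key : String) (falcon_tube_rack_slot_key : String) (falcon_well_key : String) (offset_key : String) (out : List (String × List (String × Int))) : Prop := out = distribute_vol_and_offsets_alt number_of_tubes tubes_slot_list source_slot_list offset_iterates max_tube_by_rack max_source_tube_by_rack max_tubes_fill_by_iter tube_key_preffix tube_rack_slot_key tube_well_key falcon_tube_rack_slot_key falcon_well_key offset_key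
instance (number_of_tubes : Int) (tubes_slot_list : List Int) (source_slot_list : List Int) (offset_iterates : List Int) (max_tube_by_rack : Int) (max_source_tube_by_rack : Int) (max_tubes_fill_by_iter : Int) (tube_key_preffix : String) (tube_rack_slot_key : String) (tube_well_key : String) (falcon_tube_rack_slot_key : String) (falcon_well_key : String) (offset_key : String) (out : List (String × List (String × Int))) : Decidable (Spec_distribute_vol_and_offsets number_of_tubes tubes_slot_list source_slot_list offset_iterates max_tube_by_rack max_source_tube_by_rack max_tubes_fill_by_iter tube_key_preffix tube_rack_slot_key tube_well_key falcon_tube_rack_slot_key falcon_well_key offset_key out) := by unfold Spec_distribute_vol_and_offsets; infer_instance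

-- ===== CLAIM (what is proved, stated in full; the proofs are below) =====
def Claim_equal_distribute_vol_and_offsets : Prop := ∀ (number_of_tubes : Int) (tubes_slot_list : List Int) (source_slot_list : List Int) (offset_iterates : List Int) (max_tube_by_rack : Int) (max_source_tube_by_rack : Int) (max_tubes_fill_by_iter : Int) (tube_key_preffix : String) (tube_rack_slot_key : String) (tube_well_key : String) (falcon_tube_rack_slot_key : String) (falcon_well_key : String) (offset_key : String), Dom_distribute_vol_and_offsets number_of_tubes tubes_slot_list source_slot_list offset_iterates max_tube_by_rack max_source_tube_by_rack max_tubes_fill_by_iter tube_key_preffix tube_rack_slot_key tube_well_key falcon_tube_rack_slot_key falcon_well_key offset_key → Pre_distribute_vol_and_offsets number_of_tubes tubes_slot_list source_slot_list offset_iterates max_tube_by_rack max_source_tube_by_rack max_tubes_fill_by_iter tube_key_preffix tube_rack_slot_key tube_well_key falcon_tube_rack_slot_key falcon_well_key offset_key → Spec_distribute_vol_and_offsets number_of_tubes tubes_slot_list source_slot_list offset_iterates max_tube_by_rack max_source_tube_by_rack max_tubes_fill_by_iter tube_key_preffix tube_rack_slot_key tube_well_key falcon_tube_rack_slot_key falcon_well_key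 offset_key (distribute_vol_and_offsets number_of_tubes tubes_slot_list source_slot_list offset_iterates max_tube_by_rack max_source_tube_by_rack max_tubes_fill_by_iter tube_key_preffix tube_rack_slot_key tube_well_key falcon_tube_rack_slot_key falcon_well_key offset_key)

-- ===== LEMMAS AND PROOFS =====

-- Closed forms of A's six counters just before processing tube t (L = len(offset_iterates),
-- m1/m2/m3 = the clamped capacities): (epp_rack, tube_well, falcon_rack, falcon_well, offset, fill).
def pvCF (L m1 m2 m3 t : Int) : Int × Int × Int × Int × Int × Int :=
  (t / m1, t % m1, t / m3 / L / m2, t / m3 / L % m2, t / m3 % L, t % m3)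

-- One carry step of a floor-div/mod pair (0 ≤ t, 0 < m).
lemma pvDivSucc (t m : Int) (_ht : 0 ≤ t) (hm : 0 < m) :
    (t % m + 1 ≥ m → (t + 1) / m = t / m + 1 ∧ (t + 1) % m = 0) ∧
    (t % m + 1 < m → (t + 1) / m = t / m ∧ (t + 1) % m = t % m + 1) := by
  have h0 : 0 ≤ t % m := Int.emod_nonneg t (by omega)
  have h1 : t % m < m := Int.emod_lt_of_pos t hm
  have he : m * (t / m) + t % m = t := Int.mul_ediv_add_emod t m
  constructor
  · intro h
    have hd : m * (t / m + 1) = m * (t / m) + m := by ring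
    exact (Int.ediv_emod_unique hm).mpr ⟨by omega, by omega, hm⟩
  · intro h
    exact (Int.ediv_emod_unique hm).mpr ⟨by omega, by omega, by omega⟩

lemma pvStep_eq (tsl ssl oil : List Int) (mtr msr mfi : Int) (pk k1 k2 k3 k4 k5 : String)
    (d : PySem.Dict String (List (String × Int))) (t : Int) (ht : 0 ≤ t)
    (hL : 0 < (oil.length : Int)) :
    pvStepA tsl ssl oil mtr msr mfi pk k1 k2 k3 k4 k5
        (d, pvCF (oil.length : Int) (max mtr 1) (max msr 1) (max mfi 1) t) t
      = (d.insert (pk ++ PySem.Int.toStr t)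
          (pvRowB tsl ssl oil (max mtr 1) (max msr 1) (max mfi 1) (PySem.List.len oil) k1 k2 k3 k4 k5 t),
         pvCF (oil.length : Int) (max mtr 1) (max msr 1) (max mfi 1) (t + 1)) := by
  have hm1 : (0:Int) < max mtr 1 := by omega
  have hm2 : (0:Int) < max msr 1 := by omega
  have hm3 : (0:Int) < max mfi 1 := by omega
  have hq : 0 ≤ t / max mfi 1 := Int.ediv_nonneg ht (by omega)
  have hw : 0 ≤ t / max mfi 1 / (oil.length : Int) := Int.ediv_nonneg hq (by omega)
  have b1a : 0 ≤ t % max mtr 1 := Int.emod_nonneg t (by omega)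
  have b1b : t % max mtr 1 < max mtr 1 := Int.emod_lt_of_pos t hm1
  have b3a : 0 ≤ t % max mfi 1 := Int.emod_nonneg t (by omega)
  have b3b : t % max mfi 1 < max mfi 1 := Int.emod_lt_of_pos t hm3
  have b2a : 0 ≤ t / max mfi 1 % (oil.length : Int) := Int.emod_nonneg _ (by omega)
  have b2b : t / max mfi 1 % (oil.length : Int) < (oil.length : Int) := Int.emod_lt_of_pos _ hL
  have b0a : 0 ≤ t / max mfi 1 / (oil.length : Int) % max msr 1 := Int.emod_nonneg _ (by omega)
  have b0b : t / max mfi 1 / (oil.length : Int) % max msr 1 < max msr 1 := Int.emod_lt_of_pos _ hm2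
  obtain ⟨e1c, e1n⟩ := pvDivSucc t (max mtr 1) ht hm1
  obtain ⟨e3c, e3n⟩ := pvDivSucc t (max mfi 1) ht hm3
  obtain ⟨e2c, e2n⟩ := pvDivSucc (t / max mfi 1) (oil.length : Int) hq hL
  obtain ⟨e0c, e0n⟩ := pvDivSucc (t / max mfi 1 / (oil.length : Int)) (max msr 1) hw hm2
  simp only [pvStepA, pvRowB, pvCF, PySem.List.len_eq,
    PySem.Int.floordiv_eq_ediv_of_pos hm1, PySem.Int.mod_eq_emod_of_pos hm1,
    PySem.Int.floordiv_eq_ediv_of_pos hm3,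
    PySem.Int.floordiv_eq_ediv_of_pos hL, PySem.Int.mod_eq_emod_of_pos hL,
    PySem.Int.floordiv_eq_ediv_of_pos hm2, PySem.Int.mod_eq_emod_of_pos hm2,
    Prod.mk.injEq]
  refine ⟨trivial, ?_, ?_, ?_, ?_, ?_, ?_⟩
  · split_ifs with h1
    · exact ((e1c (by omega)).1).symm
    · exact ((e1n (by omega)).1).symm
  · split_ifs with h1
    · exact ((e1c (by omega)).2).symm
    · exact ((e1n (by omega)).2).symm
  · split_ifs with h2 h3 h4
    · rw [(e3c (by omega)).1, (e2c (by omega)).1, (e0c (by omega)).1]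
    · rw [(e3c (by omega)).1, (e2c (by omega)).1, (e0n (by omega)).1]
    · rw [(e3c (by omega)).1, (e2n (by omega)).1]
    · rw [(e3n (by omega)).1]
  · split_ifs with h2 h3 h4
    · rw [(e3c (by omega)).1, (e2c (by omega)).1, (e0c (by omega)).2]
    · rw [(e3c (by omega)).1, (e2c (by omega)).1, (e0n (by omega)).2]
    · rw [(e3c (by omega)).1, (e2n (by omega)).1]
    · rw [(e3n (by omega)).1]
  · split_ifs with h2 h3
    · rw [(e3c (by omega)).1, (e2c (by omega)).2]
    · rw [(e3c (by omega)).1, (e2n (by omega)).2]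
    · rw [(e3n (by omega)).1]
  · split_ifs with h2
    · rw [(e3c (by omega)).2]
    · rw [(e3n (by omega)).2]

lemma pvFold_eq (tsl ssl oil : List Int) (mtr msr mfi : Int) (pk k1 k2 k3 k4 k5 : String)
    (hL : 0 < (oil.length : Int)) (k : Nat) :
    (PySem.List.pyRange 0 (k : Int) 1).foldl (pvStepA tsl ssl oil mtr msr mfi pk k1 k2 k3 k4 k5)
        (PySem.Dict.empty, 0, 0, 0, 0, 0, 0)
      = ((PySem.List.pyRange 0 (k : Int) 1).foldl
            (fun d tube => d.insert (pk ++ PySem.Int.toStr tube)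
              (pvRowB tsl ssl oil (max mtr 1) (max msr 1) (max mfi 1) (PySem.List.len oil) k1 k2 k3 k4 k5 tube))
            PySem.Dict.empty,
          pvCF (oil.length : Int) (max mtr 1) (max msr 1) (max mfi 1) (k : Int)) := by
  induction k with
  | zero =>
    simp only [Nat.cast_zero]
    rw [PySem.List.pyRange_one_eq_nil le_rfl]
    simp [pvCF]
  | succ k ih =>
    have hcast : ((k + 1 : Nat) : Int) = (k : Int) + 1 := by push_cast; ring
    rw [hcast, PySem.List.pyRange_one_succ_right (by positivity), List.foldl_append, List.foldl_append,
      ih, List.foldl_cons, List.foldl_nil, List.foldl_cons, List.foldl_nil,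
      pvStep_eq tsl ssl oil mtr msr mfi pk k1 k2 k3 k4 k5 _ (k : Int) (by positivity) hL]

-- ===== VERDICT (by name: the statement is the Claim_ definition above) =====
theorem distribute_vol_and_offsets_spec : Claim_equal_distribute_vol_and_offsets := by
  intro n tsl ssl oil mtr msr mfi pk k1 k2 k3 k4 k5 hDom hPre
  unfold Spec_distribute_vol_and_offsets distribute_vol_and_offsets distribute_vol_and_offsets_alt
  by_cases hn : n ≤ 0
  · rw [PySem.List.pyRange_one_eq_nil hn]
    rfl
  · have hn' : 0 < n := by omega
    have hL : 0 < (oil.length : Int) := by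
      rcases hPre with h | ⟨hne, _, _⟩
      · omega
      · have := List.length_pos_iff.mpr hne
        exact_mod_cast this
    have hcast : n = ((n.toNat : Nat) : Int) := (Int.toNat_of_nonneg (le_of_lt hn')).symm
    rw [hcast, pvFold_eq tsl ssl oil mtr msr mfi pk k1 k2 k3 k4 k5 hL n.toNat]
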